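-- pv_equiv track=rewrite | github.com/klingmu/ai-agent-blog | scripts/polish.py | find_duplicate_headings
-- ===== SOURCE A (Python) =====
-- from typing import Tuple, List, Dict, Set
--
-- def find_duplicate_headings(headings: List[Tuple[int, str]]) -> List[int]:
--     """
--     重複する見出しのインデックスを返す。
--     同じテキストを複数回使っている場合、2番目以降のインデックスを返す。
--     """
--     seen = {}
--     duplicates = []
--     for i, (level, text) in enumerate(headings):
--         if text in seen:
--             duplicates.append(i)
--         else:
--             seen[text] = i
--     return duplicates
-- ===== SOURCE B (Python) =====
-- def find_duplicate_headings(headings):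
--     # Group every index by its heading text, then keep all-but-first per group.
--     groups = {}
--     for i, (level, text) in enumerate(headings):
--         groups[text] = groups.get(text, []) + [i]
--     result = []
--     for idxs in groups.values():
--         result.extend(idxs[1:])
--     result.sort()
--     return result
-- ===== Notes on version B (the rewrite author's own statement) =====
-- stated objective: alternative
-- what changed: B groups all indices by heading text into a dict of lists in one pass, then in a second pass collects every non-first index per group and sorts the result, instead of A's single pass with a first-seen dict and in-order appending.
import Mathlib
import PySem

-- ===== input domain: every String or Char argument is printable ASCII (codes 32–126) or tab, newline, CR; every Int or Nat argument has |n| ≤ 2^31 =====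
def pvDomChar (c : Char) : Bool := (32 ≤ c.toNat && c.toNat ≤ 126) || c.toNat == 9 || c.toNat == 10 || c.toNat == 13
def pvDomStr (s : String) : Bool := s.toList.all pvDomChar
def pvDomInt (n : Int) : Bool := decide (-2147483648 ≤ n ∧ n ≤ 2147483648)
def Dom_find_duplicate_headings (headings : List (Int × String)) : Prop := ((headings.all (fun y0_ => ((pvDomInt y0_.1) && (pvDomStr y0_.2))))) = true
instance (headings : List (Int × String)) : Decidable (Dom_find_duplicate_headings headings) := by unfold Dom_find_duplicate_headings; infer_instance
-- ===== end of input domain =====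

-- B groups all indices per heading text in one dict-of-lists pass, then collects every
-- non-first index per group and sorts; A keeps a first-seen dict and appends in one pass.
-- Objective: alternative decomposition (grouping + extraction + sort), same exact result.

-- ===== PORT A =====
def find_duplicate_headings (headings : List (Int × String)) : List Int :=
  ((PySem.List.enumerate headings 0).foldl
    (fun (st : PySem.Dict String Int × List Int) p =>
      if st.1.contains p.2.2 then (st.1, st.2 ++ [p.1])
      else (st.1.insert p.2.2 p.1, st.2))
    (PySem.Dict.empty, [])).2

-- ===== PORT B =====
def find_duplicate_headings_alt (headings : List (Int × String)) : List Int :=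
  let groups := (PySem.List.enumerate headings 0).foldl
    (fun (d : PySem.Dict String (List Int)) p => d.modify p.2.2 [] (fun l => l ++ [p.1]))
    PySem.Dict.empty
  PySem.List.sorted
    (groups.values.foldl (fun acc idxs => acc ++ idxs.drop 1) [])
    (fun x => x) false

-- ===== PRECONDITION & SPEC =====
def Spec_find_duplicate_headings (headings : List (Int × String)) (out : List Int) : Prop := out = find_duplicate_headings_alt headings
instance (headings : List (Int × String)) (out : List Int) : Decidable (Spec_find_duplicate_headings headings out) := by unfold Spec_find_duplicate_headings; infer_instance

-- ===== CLAIM (what is proved, stated in full; the proofs are below) =====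
def Claim_equal_find_duplicate_headings : Prop := ∀ (headings : List (Int × String)), Dom_find_duplicate_headings headings → Spec_find_duplicate_headings headings (find_duplicate_headings headings)

-- ===== LEMMAS AND PROOFS =====

-- Proof-side names for the two folds (over an already-enumerated list).
def pvDupsAux (l : List (Int × (Int × String))) : PySem.Dict String Int × List Int :=
  l.foldl
    (fun (st : PySem.Dict String Int × List Int) p =>
      if st.1.contains p.2.2 then (st.1, st.2 ++ [p.1])
      else (st.1.insert p.2.2 p.1, st.2))
    (PySem.Dict.empty, [])

def pvGroupsAux (l : List (Int × (Int × String))) : PySem.Dict String (List Int) :=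
  l.foldl (fun (d : PySem.Dict String (List Int)) p => d.modify p.2.2 [] (fun v => v ++ [p.1]))
    PySem.Dict.empty

-- groups' keys are the distinct texts, in first-occurrence order
theorem pvGroups_keys (l : List (Int × (Int × String))) :
    (pvGroupsAux l).keys = PySem.Set.ofList (l.map (fun p => p.2.2)) := by
  have h := PySem.Dict.keys_foldl_modify_key l (fun p => p.2.2) ([] : List Int)
    (fun _ p v => v ++ [p.1]) PySem.Dict.empty
  simpa [pvGroupsAux, PySem.Dict.keys_empty, PySem.Set.update_nil_left] using h

theorem pvGroups_keys_nodup (l : List (Int × (Int × String))) :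
    (pvGroupsAux l).keys.Nodup := by
  exact PySem.Dict.nodup_keys_foldl_modify_key l (fun p => p.2.2) ([] : List Int)
    (fun _ p v => v ++ [p.1]) PySem.Dict.empty (by simp [PySem.Dict.keys_empty])

-- per-key content: the list of all indices whose text is t, in order
theorem pvGroups_getD (l : List (Int × (Int × String))) (t : String) :
    (pvGroupsAux l).getD t [] =
      (l.filter (fun p => p.2.2 == t)).map (fun p => p.1) := by
  have h := PySem.Dict.getD_foldl_modify_append
    (l.map (fun p => (p.2.2, p.1))) (PySem.Dict.empty : PySem.Dict String (List Int)) t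
  rw [List.foldl_map] at h
  simpa [pvGroupsAux, List.filter_map, Function.comp, List.map_map, PySem.Dict.getD_empty] using h

-- appending [x] to f at one key of a nodup list permutes the flatMap by one element
theorem pvFlatMap_update_perm {κ : Type} [DecidableEq κ] (keys : List κ) (k0 : κ)
    (f g : κ → List Int) (x : Int)
    (hnd : keys.Nodup) (hmem : k0 ∈ keys)
    (hg0 : g k0 = f k0 ++ [x]) (hg : ∀ k, k ≠ k0 → g k = f k) :
    (keys.flatMap g).Perm (keys.flatMap f ++ [x]) := by
  induction keys with
  | nil => cases hmem
  | cons h tl ih =>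
    rcases List.mem_cons.mp hmem with rfl | hmem'
    · have htl : tl.flatMap g = tl.flatMap f :=
        List.flatMap_congr (fun k hk => hg k (fun he => (List.nodup_cons.mp hnd).1 (he ▸ hk)))
    -- move the fresh [x] from the head group to the very end
      simp only [List.flatMap_cons, htl, hg0, List.append_assoc]
      exact List.Perm.append_left _ List.perm_append_comm
    · have hh : g h = f h := hg h (fun he => (List.nodup_cons.mp hnd).1 (he ▸ hmem'))
      simp only [List.flatMap_cons, hh, List.append_assoc]
      exact List.Perm.append_left _ (ih (List.nodup_cons.mp hnd).2 hmem')

-- the pre-sort multiset B collects, computed from keys/getD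
def pvCollect (l : List (Int × (Int × String))) : List Int :=
  (pvGroupsAux l).keys.flatMap (fun k => ((pvGroupsAux l).getD k []).drop 1)

-- main invariant, by right-append induction over headings
theorem pvMain (hs : List (Int × String)) :
    (∀ t, (pvDupsAux (PySem.List.enumerate hs 0)).1.contains t = true ↔ t ∈ hs.map (fun h => h.2))
    ∧ (pvCollect (PySem.List.enumerate hs 0)).Perm (pvDupsAux (PySem.List.enumerate hs 0)).2
    ∧ (pvDupsAux (PySem.List.enumerate hs 0)).2.Pairwise (· < ·)
    ∧ (∀ x ∈ (pvDupsAux (PySem.List.enumerate hs 0)).2, x < (hs.length : Int)) := by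
  induction hs using List.reverseRecOn with
  | nil =>
    refine ⟨?_, ?_, ?_, ?_⟩ <;> simp [pvDupsAux, pvCollect, pvGroupsAux,
      PySem.List.enumerate, PySem.Dict.contains_empty, PySem.Dict.keys_empty]
  | append_singleton hs h ih =>
    obtain ⟨ihc, ihp, ihpw, ihb⟩ := ih
    have henum : PySem.List.enumerate (hs ++ [h]) 0
        = PySem.List.enumerate hs 0 ++ [((hs.length : Int), h)] := by
      rw [PySem.List.enumerate_append]
      simp [PySem.List.enumerate]
    set e := PySem.List.enumerate hs 0 with he
    have hdups : pvDupsAux (e ++ [((hs.length : Int), h)]) =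
        (if (pvDupsAux e).1.contains h.2
          then ((pvDupsAux e).1, (pvDupsAux e).2 ++ [(hs.length : Int)])
          else ((pvDupsAux e).1.insert h.2 (hs.length : Int), (pvDupsAux e).2)) := by
      simp [pvDupsAux, List.foldl_append]
    have hgroups : pvGroupsAux (e ++ [((hs.length : Int), h)]) =
        (pvGroupsAux e).modify h.2 [] (fun v => v ++ [(hs.length : Int)]) := by
      simp [pvGroupsAux, List.foldl_append]
    have hsnd : e.map (fun p => p.2.2) = hs.map (fun x => x.2) := by
      rw [he, show (PySem.List.enumerate hs 0).map (fun p => p.2.2)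
          = ((PySem.List.enumerate hs 0).map (fun p => p.2)).map (fun x => x.2) from by
        rw [List.map_map]; rfl, PySem.List.map_snd_enumerate]
    by_cases hc : (pvDupsAux e).1.contains h.2 = true
    · -- duplicate text: A appends the index; B's group for h.2 grows by one
      have hmem : h.2 ∈ hs.map (fun x => x.2) := (ihc h.2).mp hc
      have hmem' : h.2 ∈ e.map (fun p => p.2.2) := hsnd ▸ hmem
      have hgc : (pvGroupsAux e).contains h.2 = true := by
        rw [PySem.Dict.contains_iff_mem_keys, pvGroups_keys, PySem.Set.mem_ofList]
        exact hmem'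
      have hkeys : (pvGroupsAux (e ++ [((hs.length : Int), h)])).keys = (pvGroupsAux e).keys := by
        rw [hgroups, PySem.Dict.keys_modify, PySem.Dict.keys_insert_of_contains _ _ hgc]
      have hvne : (pvGroupsAux e).getD h.2 [] ≠ [] := by
        rw [pvGroups_getD]
        obtain ⟨p, hp, hpt⟩ := List.mem_map.mp hmem'
        simp only [ne_eq, List.map_eq_nil_iff, List.filter_eq_nil_iff, not_forall]
        exact ⟨p, hp, by simp [hpt]⟩
      refine ⟨?_, ?_, ?_, ?_⟩
      · intro t
        rw [henum, hdups, if_pos hc]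
        simp only [List.map_append, List.mem_append]
        constructor
        · intro ht; exact Or.inl ((ihc t).mp ht)
        · rintro (ht | ht)
          · exact (ihc t).mpr ht
          · simp only [List.map_cons, List.map_nil, List.mem_singleton] at ht
            subst ht; exact hc
      · -- permutation
        rw [henum, hdups, if_pos hc]
        have hperm : (pvCollect (e ++ [((hs.length : Int), h)])).Perm
            (pvCollect e ++ [(hs.length : Int)]) := by
          unfold pvCollect
          rw [hkeys]
          apply pvFlatMap_update_perm _ h.2 _ _ _ (pvGroups_keys_nodup e)
            (by rwa [← PySem.Dict.contains_iff_mem_keys])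
          · rw [hgroups, PySem.Dict.getD_modify, if_pos rfl,
              List.drop_append_of_le_length (List.length_pos_of_ne_nil hvne)]
          · intro k hk
            rw [hgroups, PySem.Dict.getD_modify, if_neg hk]
        exact hperm.trans (ihp.append_right [(hs.length : Int)])
      · rw [henum, hdups, if_pos hc]
        rw [List.pairwise_append]
        refine ⟨ihpw, List.pairwise_singleton _ _, fun a ha b hb => ?_⟩
        simp only [List.mem_singleton] at hb
        subst hb; exact ihb a ha
      · rw [henum, hdups, if_pos hc]
        intro x hx
        simp only [List.length_append]
        rcases List.mem_append.mp hx with hx | hx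
        · have := ihb x hx; push_cast; omega
        · simp only [List.mem_singleton] at hx; subst hx
          have h1 : ([h] : List (Int × String)).length = 1 := rfl
          rw [h1]; push_cast; omega
    · -- fresh text: A records first index; B opens a singleton group (nothing collected)
      have hc' : (pvDupsAux e).1.contains h.2 = false := by
        cases hcv : (pvDupsAux e).1.contains h.2
        · rfl
        · exact absurd hcv hc
      have hmem : h.2 ∉ hs.map (fun x => x.2) := fun hm => hc ((ihc h.2).mpr hm)
      have hgc : (pvGroupsAux e).contains h.2 = false := by
        cases hcv : (pvGroupsAux e).contains h.2
        · rfl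
        · exfalso
          apply hmem
          have hk := (PySem.Dict.contains_iff_mem_keys _ _).mp hcv
          rw [pvGroups_keys, PySem.Set.mem_ofList] at hk
          exact hsnd ▸ hk
      have hknotmem : h.2 ∉ (pvGroupsAux e).keys := by
        intro hk
        have := (PySem.Dict.contains_iff_mem_keys (pvGroupsAux e) h.2).mpr hk
        rw [hgc] at this
        exact Bool.false_ne_true this
      have hkeys : (pvGroupsAux (e ++ [((hs.length : Int), h)])).keys
          = (pvGroupsAux e).keys ++ [h.2] := by
        rw [hgroups, PySem.Dict.keys_modify, PySem.Dict.keys_insert_of_not_contains _ _ hgc]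
      refine ⟨?_, ?_, ?_, ?_⟩
      · intro t
        rw [henum, hdups, if_neg hc]
        simp only [PySem.Dict.contains_insert, List.map_append, List.mem_append]
        constructor
        · intro ht
          rcases Bool.or_eq_true_iff.mp ht with ht | ht
          · right; simp [eq_of_beq ht]
          · left; exact (ihc t).mp ht
        · intro ht
          rcases ht with ht | ht
          · exact Bool.or_eq_true_iff.mpr (Or.inr ((ihc t).mpr ht))
          · simp at ht
            exact Bool.or_eq_true_iff.mpr (Or.inl (by simp [ht]))
      · rw [henum, hdups, if_neg hc]
        have : pvCollect (e ++ [((hs.length : Int), h)]) = pvCollect e := by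
          unfold pvCollect
          rw [hkeys]
          rw [List.flatMap_append]
          have h1 : ([h.2].flatMap fun k =>
              ((pvGroupsAux (e ++ [((hs.length : Int), h)])).getD k []).drop 1) = [] := by
            simp only [List.flatMap_cons, List.flatMap_nil, List.append_nil]
            rw [hgroups, PySem.Dict.getD_modify, if_pos rfl,
              PySem.Dict.getD_of_not_contains _ _ hgc]
            simp
          rw [h1, List.append_nil]
          apply List.flatMap_congr
          intro k hk
          rw [hgroups, PySem.Dict.getD_modify, if_neg (fun he2 => hknotmem (by rw [← he2]; exact hk))]
        rw [this]; exact ihp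
      · rw [henum, hdups, if_neg hc]; exact ihpw
      · rw [henum, hdups, if_neg hc]
        intro x hx
        simp only [List.length_append]
        have := ihb x hx; push_cast; omega

-- ===== VERDICT (by name: the statement is the Claim_ definition above) =====
theorem find_duplicate_headings_spec : Claim_equal_find_duplicate_headings := by
  intro hs _
  unfold Spec_find_duplicate_headings
  obtain ⟨_, hperm, hpw, _⟩ := pvMain hs
  have hA : find_duplicate_headings hs = (pvDupsAux (PySem.List.enumerate hs 0)).2 := rfl
  have hB0 : find_duplicate_headings_alt hs =
      PySem.List.sorted
        ((pvGroupsAux (PySem.List.enumerate hs 0)).values.foldl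
          (fun acc idxs => acc ++ idxs.drop 1) [])
        (fun x => x) false := rfl
  have hB : find_duplicate_headings_alt hs =
      PySem.List.sorted (pvCollect (PySem.List.enumerate hs 0)) (fun x => x) false := by
    rw [hB0, PySem.List.foldl_append_eq_flatMap (fun idxs : List Int => idxs.drop 1) _ [],
      PySem.Dict.values_eq_map_keys _ (pvGroups_keys_nodup _) ([] : List Int),
      List.flatMap_map]
    rfl
  rw [hA, hB]
  exact (PySem.List.sorted_eq_of_perm_of_pairwise_lt _ _ _ hperm.symm hpw).symm
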